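-- pv_equiv track=rewrite | github.com/Soobean/graph-rag-core | src/auth/models.py | permissions_for_roles
-- ===== SOURCE A (Python) =====
-- DEFAULT_ROLE_PERMISSIONS: dict[str, list[str]] = {
--     "admin": ["*"],
--     "manager": [
--         "query:*/search",
--         "node:*/read",
--         "graph:edit/read",
--         "graph:edit/write",
--     ],
--     "editor": [
--         "query:*/search",
--         "node:*/read",
--         "graph:edit/read",
--         "graph:edit/write",
--     ],
--     "viewer": [
--         "query:*/search",
--         "node:*/read",
--     ],
-- }
--
-- def permissions_for_roles(roles: list[str]) -> list[str]:
--     """역할 목록에서 통합 권한 목록 생성 (중복 제거)"""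
--     perms: list[str] = []
--     seen: set[str] = set()
--     for role in roles:
--         for perm in DEFAULT_ROLE_PERMISSIONS.get(role, []):
--             if perm not in seen:
--                 perms.append(perm)
--                 seen.add(perm)
--     return perms
-- ===== SOURCE B (Python) =====
-- DEFAULT_ROLE_PERMISSIONS: dict[str, list[str]] = {
--     "admin": ["*"],
--     "manager": [
--         "query:*/search",
--         "node:*/read",
--         "graph:edit/read",
--         "graph:edit/write",
--     ],
--     "editor": [
--         "query:*/search",
--         "node:*/read",
--         "graph:edit/read",
--         "graph:edit/write",
--     ],
--     "viewer": [
--         "query:*/search",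
--         "node:*/read",
--     ],
-- }
--
-- def _first_occurrences(perms: list[str]) -> list[str]:
--     """Recursively keep the head and drop every later copy of it from the rest."""
--     if not perms:
--         return []
--     head = perms[0]
--     return [head] + _first_occurrences([p for p in perms[1:] if p != head])
--
-- def permissions_for_roles(roles: list[str]) -> list[str]:
--     """역할 목록에서 통합 권한 목록 생성 (중복 제거)"""
--     flat = [perm for role in roles for perm in DEFAULT_ROLE_PERMISSIONS.get(role, [])]
--     return _first_occurrences(flat)
-- ===== Notes on version B (the rewrite author's own statement) =====
-- stated objective: alternative
-- what changed: Replaced the single accumulator pass (order list + seen set + membership branch) by two stages: flatten all roles' permission lists, then dedup by a recursive filter that keeps each head and deletes all its later copies, so no seen set or membership test against an accumulator exists.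
import Mathlib
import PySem

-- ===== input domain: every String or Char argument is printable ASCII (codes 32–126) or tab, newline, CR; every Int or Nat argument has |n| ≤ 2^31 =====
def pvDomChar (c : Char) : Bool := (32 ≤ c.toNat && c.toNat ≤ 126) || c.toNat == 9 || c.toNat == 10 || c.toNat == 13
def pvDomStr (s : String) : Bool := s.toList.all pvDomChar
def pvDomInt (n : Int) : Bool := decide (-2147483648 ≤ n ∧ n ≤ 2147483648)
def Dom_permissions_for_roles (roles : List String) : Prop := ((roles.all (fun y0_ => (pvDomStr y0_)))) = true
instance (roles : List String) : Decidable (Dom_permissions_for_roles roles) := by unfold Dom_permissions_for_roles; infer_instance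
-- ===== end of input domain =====

-- B replaces A's single accumulator pass (order list + seen set + membership branch)
-- by a two-stage algorithm: flatten, then recursively keep each head and delete its
-- later copies; an alternative of the same practical cost.


-- ===== PORT A =====
def DEFAULT_ROLE_PERMISSIONS : PySem.Dict String (List String) :=
  PySem.Dict.ofList
    [("admin", ["*"]),
     ("manager", ["query:*/search", "node:*/read", "graph:edit/read", "graph:edit/write"]),
     ("editor", ["query:*/search", "node:*/read", "graph:edit/read", "graph:edit/write"]),
     ("viewer", ["query:*/search", "node:*/read"])]

def permissions_for_roles (roles : List String) : List String :=
  (roles.foldl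
    (fun (st : List String × PySem.Set String) role =>
      (DEFAULT_ROLE_PERMISSIONS.getD role []).foldl
        (fun st perm =>
          if st.2.contains perm then st
          else (st.1 ++ [perm], PySem.Set.add st.2 perm))
        st)
    ([], PySem.Set.empty)).1

-- ===== PORT B =====
-- _first_occurrences: keep the head, recurse on the rest with the head filtered out.
def first_occurrences : List String → List String
  | [] => []
  | head :: rest => head :: first_occurrences (rest.filter (fun p => p != head))
termination_by perms => perms.length
decreasing_by
  simpa using Nat.lt_succ_of_le (List.length_filter_le _ _)

def permissions_for_roles_alt (roles : List String) : List String :=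
  first_occurrences (roles.flatMap (fun role => DEFAULT_ROLE_PERMISSIONS.getD role []))

-- ===== PRECONDITION & SPEC =====
def Spec_permissions_for_roles (roles : List String) (out : List String) : Prop := out = permissions_for_roles_alt roles
instance (roles : List String) (out : List String) : Decidable (Spec_permissions_for_roles roles out) := by unfold Spec_permissions_for_roles; infer_instance

-- ===== CLAIM =====
def Claim_equal_permissions_for_roles : Prop := ∀ (roles : List String), Dom_permissions_for_roles roles → Spec_permissions_for_roles roles (permissions_for_roles roles)

-- ===== LEMMAS AND PROOFS =====

-- A's inner loop on an equal-components state keeps the components equal and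
-- computes Set.update (= foldl Set.add) of the seen set.
theorem inner_loop_eq (l : List String) (s : PySem.Set String) :
    l.foldl
      (fun (st : List String × PySem.Set String) perm =>
        if st.2.contains perm then st
        else (st.1 ++ [perm], PySem.Set.add st.2 perm))
      (s, s) = (PySem.Set.update s l, PySem.Set.update s l) := by
  induction l generalizing s with
  | nil => simp [PySem.Set.update]
  | cons x xs ih =>
    have hstep :
        (if (PySem.Set.contains s x) then ((s : List String), s)
         else (s ++ [x], PySem.Set.add s x)) = (PySem.Set.add s x, PySem.Set.add s x) := by
      by_cases h : x ∈ s <;> simp [PySem.Set.add, h]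
    rw [List.foldl_cons]
    exact hstep ▸ ih (PySem.Set.add s x)

-- A's whole nested loop computes Set.update of the flattened permission lists.
theorem outer_loop_eq (roles : List String) (s : PySem.Set String) :
    roles.foldl
      (fun (st : List String × PySem.Set String) role =>
        (DEFAULT_ROLE_PERMISSIONS.getD role []).foldl
          (fun st perm =>
            if st.2.contains perm then st
            else (st.1 ++ [perm], PySem.Set.add st.2 perm))
          st)
      (s, s)
    = (PySem.Set.update s (roles.flatMap (fun role => DEFAULT_ROLE_PERMISSIONS.getD role [])),
       PySem.Set.update s (roles.flatMap (fun role => DEFAULT_ROLE_PERMISSIONS.getD role []))) := by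
  induction roles generalizing s with
  | nil => simp [PySem.Set.update]
  | cons r rs ih =>
    simp only [List.foldl_cons, List.flatMap_cons, inner_loop_eq]
    rw [ih]
    simp [PySem.Set.update, List.foldl_append]

-- Updating a set by a list with an already-present element filtered out changes nothing.
theorem update_filter_mem (xs : List String) (s : PySem.Set String) (x : String) (hx : x ∈ s) :
    PySem.Set.update s (xs.filter (fun p => p != x)) = PySem.Set.update s xs := by
  induction xs generalizing s with
  | nil => rfl
  | cons y ys ih =>
    by_cases h : y = x
    · subst h
      have hadd : PySem.Set.add s y = s := by simp [PySem.Set.add, hx]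
      simp only [List.filter_cons, PySem.Set.update, List.foldl_cons, hadd]
      simpa [PySem.Set.update] using ih s hx
    · have hmem : x ∈ PySem.Set.add s y := by
        by_cases hy : y ∈ s <;> simp [PySem.Set.add, hy, hx]
      simp only [List.filter_cons, bne_iff_ne, ne_eq, h, not_false_eq_true,
        if_true, PySem.Set.update, List.foldl_cons]
      simpa [PySem.Set.update] using ih (PySem.Set.add s y) hmem

-- An element absent from the list commutes out of the accumulator.
theorem update_cons_not_mem (ys : List String) (s : PySem.Set String) (x : String) (hx : x ∉ ys) :
    PySem.Set.update (x :: s) ys = x :: PySem.Set.update s ys := by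
  induction ys generalizing s with
  | nil => rfl
  | cons y ys ih =>
    have hyx : y ≠ x := fun h => hx (h ▸ List.mem_cons_self)
    have hx' : x ∉ ys := fun h => hx (List.mem_cons_of_mem _ h)
    have hadd : PySem.Set.add (x :: s) y = x :: PySem.Set.add s y := by
      by_cases hy : y ∈ s <;> simp [PySem.Set.add, hy, hyx]
    simp only [PySem.Set.update, List.foldl_cons, hadd]
    simpa [PySem.Set.update] using ih (PySem.Set.add s y) hx'

-- B's recursion computes the first-occurrence dedup that A's accumulator computes.
theorem first_occurrences_eq_update (xs : List String) :
    first_occurrences xs = PySem.Set.update PySem.Set.empty xs := by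
  induction xs using first_occurrences.induct with
  | case1 => simp [first_occurrences, PySem.Set.update, PySem.Set.empty]
  | case2 head rest ih =>
    have h1 : PySem.Set.update (PySem.Set.empty : PySem.Set String) (head :: rest)
        = PySem.Set.update [head] rest := by
      simp [PySem.Set.update, PySem.Set.add, PySem.Set.empty]
    have h2 : PySem.Set.update ([head] : PySem.Set String) rest
        = PySem.Set.update [head] (rest.filter (fun p => p != head)) :=
      (update_filter_mem rest [head] head (by simp)).symm
    simp only [List.unattach_filter, List.unattach_attach] at ih
    have hnm : head ∉ rest.filter (fun p => p != head) := by
      simp [List.mem_filter]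
    rw [first_occurrences, h1, h2]
    rw [show ([head] : PySem.Set String) = head :: ([] : PySem.Set String) from rfl]
    rw [update_cons_not_mem _ _ _ hnm, ih]
    rfl

-- ===== VERDICT =====
theorem permissions_for_roles_spec : Claim_equal_permissions_for_roles := by
  intro roles _
  show permissions_for_roles roles = permissions_for_roles_alt roles
  unfold permissions_for_roles permissions_for_roles_alt
  have h := outer_loop_eq roles PySem.Set.empty
  simp only [PySem.Set.empty] at h ⊢
  rw [h, first_occurrences_eq_update]
  simp [PySem.Set.empty]
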